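-- pv_equiv track=rewrite | github.com/Byeong-soo/Algorithm | 프로그래머스/level_1/푸드파이터대회.py | solution
-- ===== SOURCE A (Python) =====
-- import collections
--
-- def solution(food):
--     answer = ''
--     answer_list = []
--     deque = collections.deque([])
--
--     for i in range(1,len(food)):
--         count = food[i] // 2
--         for j in range(count):
--             answer_list.append(i)
--             deque.appendleft(i)
--
--     answer_list.append(0)
--     answer = answer_list + list(deque)
--     answer = "".join(map(str,answer))
--
--     return answer
-- ===== SOURCE B (Python) =====
-- import collections
--
-- def solution(food):
--     parts = collections.deque(["0"])
--     for i in range(len(food) - 1, 0, -1):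
--         half = str(i) * (food[i] // 2)
--         parts.appendleft(half)
--         parts.append(half)
--     return "".join(parts)
-- ===== Notes on version B (the rewrite author's own statement) =====
-- stated objective: alternative
-- what changed: B walks the indices from the last down to 1 and wraps a deque of string chunks from the inside out around "0" (appendleft/append of str(i)*(food[i]//2)), joining once at the end, instead of A's forward pass that grows an int list and an int deque element-by-element inside nested loops.
import Mathlib
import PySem

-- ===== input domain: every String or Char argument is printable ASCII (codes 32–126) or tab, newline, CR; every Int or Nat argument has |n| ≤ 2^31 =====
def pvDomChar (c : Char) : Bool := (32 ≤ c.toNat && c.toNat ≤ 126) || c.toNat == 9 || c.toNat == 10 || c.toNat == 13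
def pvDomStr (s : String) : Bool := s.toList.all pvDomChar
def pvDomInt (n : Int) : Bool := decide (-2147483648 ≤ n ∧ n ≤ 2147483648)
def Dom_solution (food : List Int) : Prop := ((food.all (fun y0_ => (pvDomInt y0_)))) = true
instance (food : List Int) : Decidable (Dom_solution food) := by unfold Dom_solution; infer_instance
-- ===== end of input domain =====

-- B walks the indices from the last down to 1, wrapping a chunk sequence from the inside out
-- around "0" and joining once, instead of A's forward per-element list+deque construction (objective: alternative).


-- ===== PORT A =====
def solution (food : List Int) : String :=
  -- answer_list grows on the right, deque gets i prepended (appendleft)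
  let st : List Int × List Int :=
    (PySem.List.pyRange 1 (food.length : Int) 1).foldl
      (fun st i =>
        let count := PySem.Int.floordiv (PySem.List.pyGetD food i 0) 2  -- food[i]; i always in range here
        (PySem.List.pyRange 0 count 1).foldl
          (fun st _ => (st.1 ++ [i], i :: st.2)) st)
      ([], [])
  let answer_list := st.1 ++ [(0 : Int)]
  let answer := answer_list ++ st.2
  PySem.Str.join "" (answer.map PySem.Int.toStr)

-- ===== PORT B =====
-- parts is a deque of string chunks, modelled as List (List Char): appendleft = cons, append = ++ [·];
-- str(i) * count = pyRepeat over the chars (exact); "".join(parts) = Chars.join [] (exact)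
def solution_alt (food : List Int) : String :=
  String.ofList
    (PySem.Chars.join []
      ((PySem.List.pyRange ((food.length : Int) - 1) 0 (-1)).foldl
        (fun parts i =>
          let half := PySem.List.pyRepeat (PySem.Int.toStr i).toList
                        (PySem.Int.floordiv (PySem.List.pyGetD food i 0) 2)  -- str(i) * (food[i] // 2)
          (half :: parts) ++ [half])
        [['0']]))

-- ===== PRECONDITION & SPEC =====
def Spec_solution (food : List Int) (out : String) : Prop := out = solution_alt food
instance (food : List Int) (out : String) : Decidable (Spec_solution food out) := by unfold Spec_solution; infer_instance

-- ===== CLAIM (what is proved, stated in full; the proofs are below) =====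
def Claim_equal_solution : Prop := ∀ (food : List Int), Dom_solution food → Spec_solution food (solution food)

-- ===== LEMMAS AND PROOFS =====

-- the per-index count food[i]//2 (clamped to Nat; negative counts give empty ranges)
def pvCnt (food : List Int) (i : Int) : Nat :=
  (PySem.Int.floordiv (PySem.List.pyGetD food i 0) 2).toNat

-- the left half as a flat list of Int tokens
def pvSeg (food : List Int) (L : List Int) : List Int :=
  L.flatMap (fun i => List.replicate (pvCnt food i) i)

-- the char block contributed by index i: str(i) repeated food[i]//2 times
def pvTok (food : List Int) (i : Int) : List Char :=
  List.flatten (List.replicate (pvCnt food i) (PySem.Int.toStr i).toList)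

def pvF (food : List Int) (M : List Int) : List Char := M.flatMap (pvTok food)

theorem pvRep_comm {α : Type} (n : Nat) (a : α) :
    a :: List.replicate n a = List.replicate n a ++ [a] := by
  rw [← List.replicate_succ, List.replicate_succ']

-- A's inner loop: append i on the right of answer_list, prepend i to the deque, once per element
theorem pvInner (R : List Int) (i : Int) : ∀ al dq : List Int,
    R.foldl (fun st (_ : Int) => (st.1 ++ [i], i :: st.2)) (al, dq)
      = (al ++ List.replicate R.length i, List.replicate R.length i ++ dq) := by
  induction R with
  | nil => simp
  | cons x R ih =>
    intro al dq
    rw [List.foldl_cons, ih]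
    refine Prod.ext ?_ ?_
    · simp [List.replicate_succ, List.append_assoc]
    · simp only [List.length_cons, List.replicate_succ]
      rw [pvRep_comm, List.append_assoc]
      rfl

-- A's outer loop, characterised: answer_list gains pvSeg, the deque gains its reverse in front
theorem pvOuter (food : List Int) (L : List Int) : ∀ al dq : List Int,
    L.foldl (fun st i =>
        (PySem.List.pyRange 0 (PySem.Int.floordiv (PySem.List.pyGetD food i 0) 2) 1).foldl
          (fun st (_ : Int) => (st.1 ++ [i], i :: st.2)) st) (al, dq)
      = (al ++ pvSeg food L, (pvSeg food L).reverse ++ dq) := by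
  induction L with
  | nil => simp [pvSeg]
  | cons x L ih =>
    intro al dq
    rw [List.foldl_cons, pvInner, ih]
    refine Prod.ext ?_ ?_
    · simp [pvSeg, pvCnt, PySem.List.length_pyRange_one, List.append_assoc]
    · simp [pvSeg, pvCnt, PySem.List.length_pyRange_one, List.append_assoc]

-- "".join concatenates
theorem pvJoinNil (ps : List (List Char)) : PySem.Chars.join [] ps = ps.flatten := by
  induction ps with
  | nil => simp [PySem.Chars.join_nil]
  | cons p rest ih =>
    cases rest with
    | nil => simp [PySem.Chars.join_singleton]
    | cons q r => rw [PySem.Chars.join_cons_cons, ih]; simp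

-- flattening the stringified tokens of pvSeg gives exactly the char blocks pvF
theorem pvSegChars (food : List Int) (M : List Int) :
    (pvSeg food M).flatMap (fun i => (PySem.Int.toStr i).toList) = pvF food M := by
  induction M with
  | nil => simp [pvSeg, pvF]
  | cons x M ih =>
    simp only [pvSeg, pvF, List.flatMap_cons, List.flatMap_append] at *
    rw [ih]
    simp [pvTok, List.flatMap_replicate]

-- reversing the token list commutes with pvSeg (each segment is a constant replicate)
theorem pvSegReverse (food : List Int) (M : List Int) :
    (pvSeg food M).reverse = pvSeg food M.reverse := by
  simp [pvSeg, List.reverse_flatMap, Function.comp_def]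

-- B's wrapping fold, characterised: the chunk list is tokens of M reversed, the centre, tokens of M
theorem pvWrap (food : List Int) (M : List Int) : ∀ p : List (List Char),
    M.foldl (fun parts i =>
        (PySem.List.pyRepeat (PySem.Int.toStr i).toList
          (PySem.Int.floordiv (PySem.List.pyGetD food i 0) 2) :: parts) ++
        [PySem.List.pyRepeat (PySem.Int.toStr i).toList
          (PySem.Int.floordiv (PySem.List.pyGetD food i 0) 2)]) p
      = M.reverse.map (pvTok food) ++ p ++ M.map (pvTok food) := by
  induction M with
  | nil => simp
  | cons x M ih =>
    intro p
    have hx : PySem.List.pyRepeat (PySem.Int.toStr x).toList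
        (PySem.Int.floordiv (PySem.List.pyGetD food x 0) 2) = pvTok food x := by
      simp [PySem.List.pyRepeat, pvTok, pvCnt]
    rw [List.foldl_cons, ih, hx]
    simp [List.append_assoc]

-- the countdown range is the reverse of A's forward range
theorem pvRangeRev (n : Int) :
    PySem.List.pyRange (n - 1) 0 (-1) = (PySem.List.pyRange 1 n 1).reverse := by
  have := PySem.List.pyRange_neg_one_eq_reverse (n - 1) 0
  simpa using this

-- ===== VERDICT (by name: the statement is the Claim_ definition above) =====
theorem solution_spec : Claim_equal_solution := by
  intro food _
  unfold Spec_solution solution solution_alt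
  rw [pvOuter, pvRangeRev, pvWrap, List.reverse_reverse]
  simp only [List.append_nil, List.nil_append]
  rw [PySem.Str.join, show ("" : String).toList = [] from rfl]
  congr 1
  rw [pvJoinNil, pvJoinNil]
  simp only [List.flatten_append, List.flatten_cons, List.flatten_nil, List.append_nil,
    List.flatMap_def.symm]
  rw [show (List.flatMap (pvTok food) = pvF food) from rfl]
  have h1 := pvSegChars food (PySem.List.pyRange 1 (food.length : Int) 1)
  have h2 := pvSegChars food (PySem.List.pyRange 1 (food.length : Int) 1).reverse
  rw [← pvSegReverse] at h2
  have h0 : PySem.Int.toChars 0 = ['0'] := by decide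
  simp only [List.flatMap_append, List.flatMap_map] at h1 h2 ⊢
  rw [h1, h2]
  simp [h0]
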